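-- pv_equiv track=rewrite | github.com/celjensen/ride-segment-recorder | utils.py | group_segments
-- ===== SOURCE A (Python) =====
-- def group_segments(tagged_points, target_label):
--     segments = []
--     current_segment = []
--
--     # Loop through tagged points
--     for point, label in tagged_points:
--         # If label matches target (Good or Bad), append
--         if label == target_label:
--             current_segment.append(point)
--         else:
--             # If current segment not empty, append to segments
--             # Basically, we have finished one continuous segment of points
--             if current_segment:
--                 segments.append(current_segment)
--                 current_segment = []
--
--     # Add last segment if it ends on target label
--     if current_segment:
--         segments.append(current_segment)
--
--     return segments
-- ===== SOURCE B (Python) =====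
-- def group_segments(tagged_points, target_label):
--     n = len(tagged_points)
--     match = [label == target_label for _, label in tagged_points]
--     starts = [i for i in range(n) if match[i] and (i == 0 or not match[i - 1])]
--     ends = [i for i in range(n) if match[i] and (i == n - 1 or not match[i + 1])]
--     return [[tagged_points[j][0] for j in range(s, e + 1)]
--             for s, e in zip(starts, ends)]
-- ===== Notes on version B (the rewrite author's own statement) =====
-- stated objective: alternative
-- what changed: Replaces the sequential state machine (current_segment accumulator with two flush points) by a stateless staged computation: a boolean match mask, two index comprehensions selecting run-start and run-end positions, and a zip of the two that materialises each segment by index slicing.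
import Mathlib
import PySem

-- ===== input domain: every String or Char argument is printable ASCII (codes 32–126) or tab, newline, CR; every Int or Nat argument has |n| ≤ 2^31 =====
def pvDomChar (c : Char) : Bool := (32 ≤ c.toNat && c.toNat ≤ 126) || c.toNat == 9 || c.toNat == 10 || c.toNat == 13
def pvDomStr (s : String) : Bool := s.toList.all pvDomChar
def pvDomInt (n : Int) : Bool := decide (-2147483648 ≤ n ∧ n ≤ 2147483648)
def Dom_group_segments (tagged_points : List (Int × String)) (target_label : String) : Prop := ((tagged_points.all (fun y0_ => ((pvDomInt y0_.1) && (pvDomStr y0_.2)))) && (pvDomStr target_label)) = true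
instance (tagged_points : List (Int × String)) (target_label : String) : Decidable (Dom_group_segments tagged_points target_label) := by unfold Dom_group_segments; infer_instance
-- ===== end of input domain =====

-- B replaces A's sequential state machine by a stateless staged computation (match mask,
-- run-start and run-end index lists, zip + slices); same O(n) cost, alternative algorithm.

-- ===== PORT A =====
-- A's loop state: (segments, current_segment)
def pvStepA (t : String) (s : List (List Int) × List Int) (pl : Int × String) :
    List (List Int) × List Int :=
  if pl.2 = t then (s.1, s.2 ++ [pl.1])
  else if s.2 ≠ [] then (s.1 ++ [s.2], []) else s

def group_segments (tagged_points : List (Int × String)) (target_label : String) : List (List Int) :=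
  let s := tagged_points.foldl (pvStepA target_label) ([], [])
  if s.2 ≠ [] then s.1 ++ [s.2] else s.1

-- ===== PORT B =====
-- match = [label == target_label for _, label in tagged_points]
def pvMask (tagged_points : List (Int × String)) (target_label : String) : List Bool :=
  tagged_points.map (fun pl => pl.2 == target_label)

-- starts = [i for i in range(n) if match[i] and (i == 0 or not match[i-1])]
def pvStarts (m : List Bool) : List Nat :=
  (List.range m.length).filter (fun i => m.getD i false && (decide (i = 0) || !(m.getD (i-1) false)))

-- ends = [i for i in range(n) if match[i] and (i == n-1 or not match[i+1])]
def pvEnds (m : List Bool) : List Nat :=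
  (List.range m.length).filter (fun i => m.getD i false && (decide (i = m.length - 1) || !(m.getD (i+1) false)))

-- [tagged_points[j][0] for j in range(s, e+1)]
def pvSlice (tagged_points : List (Int × String)) (se : Nat × Nat) : List Int :=
  (List.range' se.1 (se.2 + 1 - se.1)).map (fun j => (tagged_points.getD j ((0 : Int), "")).1)

def group_segments_alt (tagged_points : List (Int × String)) (target_label : String) : List (List Int) :=
  let m := pvMask tagged_points target_label
  ((pvStarts m).zip (pvEnds m)).map (pvSlice tagged_points)

-- ===== PRECONDITION & SPEC =====
def Spec_group_segments (tagged_points : List (Int × String)) (target_label : String) (out : List (List Int)) : Prop := out = group_segments_alt tagged_points target_label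
instance (tagged_points : List (Int × String)) (target_label : String) (out : List (List Int)) : Decidable (Spec_group_segments tagged_points target_label out) := by unfold Spec_group_segments; infer_instance

-- ===== CLAIM (what is proved, stated in full; the proofs are below) =====
def Claim_equal_group_segments : Prop := ∀ (tagged_points : List (Int × String)) (target_label : String), Dom_group_segments tagged_points target_label → Spec_group_segments tagged_points target_label (group_segments tagged_points target_label)

-- ===== LEMMAS AND PROOFS =====

-- A as structural recursion over the list (flush-on-end state machine)
def pvFlush (c : List Int) : List (List Int) := if c = [] then [] else [c]

def pvFA (t : String) (c : List Int) : List (Int × String) → List (List Int)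
  | [] => pvFlush c
  | (p, l) :: xs => if l = t then pvFA t (c ++ [p]) xs else pvFlush c ++ pvFA t [] xs

theorem foldA_eq (t : String) :
    ∀ (xs : List (Int × String)) (segs : List (List Int)) (c : List Int),
      (let s := xs.foldl (pvStepA t) (segs, c);
       if s.2 ≠ [] then s.1 ++ [s.2] else s.1) = segs ++ pvFA t c xs := by
  intro xs
  induction xs with
  | nil =>
      intro segs c
      by_cases hc : c = [] <;> simp [pvFA, pvFlush, hc]
  | cons pl rest ih =>
      intro segs c
      obtain ⟨p, l⟩ := pl
      by_cases hl : l = t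
      · simpa [pvStepA, pvFA, hl] using ih segs (c ++ [p])
      · by_cases hc : c = []
        · simpa [pvStepA, pvFA, pvFlush, hl, hc] using ih segs []
        · simpa [pvStepA, pvFA, pvFlush, hl, hc] using ih (segs ++ [c]) []

theorem A_eq_fA (tp : List (Int × String)) (t : String) :
    group_segments tp t = pvFA t [] tp := by
  simpa [group_segments] using foldA_eq t tp [] []

theorem fA_run (t : String) :
    ∀ (u : List (Int × String)) (c : List Int) (v : List (Int × String)),
      (∀ pl ∈ u, pl.2 = t) → pvFA t c (u ++ v) = pvFA t (c ++ u.map Prod.fst) v := by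
  intro u
  induction u with
  | nil => intro c v _; simp
  | cons pl rest ih =>
      intro c v hall
      obtain ⟨p, l⟩ := pl
      have hl : l = t := hall (p, l) (by simp)
      simp only [List.cons_append, pvFA, if_pos hl]
      simpa using ih (c ++ [p]) v (fun q hq => hall q (by simp [hq]))

-- ==== B-side mask lemmas ====

theorem mask_cons (p : Int) (l : String) (xs : List (Int × String)) (t : String) :
    pvMask ((p, l) :: xs) t = (l == t) :: pvMask xs t := rfl

theorem starts_cons_false (m : List Bool) :
    pvStarts (false :: m) = (pvStarts m).map (fun i => i + 1) := by
  unfold pvStarts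
  rw [show (false :: m).length = m.length + 1 from rfl, List.range_succ_eq_map]
  rw [List.filter_cons_of_neg (by simp), List.filter_map]
  congr 1
  apply List.filter_congr
  intro i _
  rcases i with _ | j <;> simp [Nat.succ_eq_add_one]

theorem ends_cons_false (m : List Bool) :
    pvEnds (false :: m) = (pvEnds m).map (fun i => i + 1) := by
  unfold pvEnds
  rw [show (false :: m).length = m.length + 1 from rfl, List.range_succ_eq_map]
  rw [List.filter_cons_of_neg (by simp), List.filter_map]
  congr 1
  apply List.filter_congr
  intro i hi
  have hi' : i < m.length := List.mem_range.mp hi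
  simp only [Function.comp_apply, Nat.succ_eq_add_one, List.getD_cons_succ]
  have hdec : decide (i + 1 = m.length + 1 - 1) = decide (i = m.length - 1) := by
    apply decide_eq_decide.mpr; omega
  rw [hdec]

theorem starts_run (k : Nat) (hk : 0 < k) (m : List Bool) (h0 : m.getD 0 false = false) :
    pvStarts (List.replicate k true ++ m) = 0 :: (pvStarts m).map (fun i => k + i) := by
  unfold pvStarts
  have hlen : (List.replicate k true ++ m).length = k + m.length := by simp
  rw [hlen, List.range_add, List.filter_append, List.filter_map]
  have hL : ∀ i, i < k → (List.replicate k true ++ m).getD i false = true := by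
    intro i hik
    rw [List.getD_append _ _ _ _ (by simpa using hik)]
    exact List.getD_replicate _ hik
  have hR : ∀ i, (List.replicate k true ++ m).getD (k + i) false = m.getD i false := by
    intro i
    rw [List.getD_append_right _ _ _ _ (by simp)]
    have h4 : k + i - (List.replicate k true).length = i := by simp
    rw [h4]
  have hpart1 : List.filter
      (fun i => (List.replicate k true ++ m).getD i false &&
        (decide (i = 0) || !(List.replicate k true ++ m).getD (i - 1) false))
      (List.range k) = [0] := by
    obtain ⟨k', rfl⟩ : ∃ k', k = k' + 1 := ⟨k - 1, by omega⟩
    rw [List.range_succ_eq_map,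
      List.filter_cons_of_pos (by have := hL 0 (by omega); simp only [this]; simp)]
    have hnil : List.filter
        (fun i => (List.replicate (k' + 1) true ++ m).getD i false &&
          (decide (i = 0) || !(List.replicate (k' + 1) true ++ m).getD (i - 1) false))
        (List.map Nat.succ (List.range k')) = [] := by
      rw [List.filter_eq_nil_iff]
      intro x hx
      obtain ⟨j, hj, rfl⟩ := List.mem_map.mp hx
      have hj' : j < k' := List.mem_range.mp hj
      have e1 := hL (j + 1) (by omega)
      have e2 := hL j (by omega)
      simp only [Nat.succ_eq_add_one, Nat.add_sub_cancel, e1, e2]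
      simp
    rw [hnil]
  rw [hpart1, List.singleton_append]
  congr 1
  congr 1
  apply List.filter_congr
  intro i hi
  have hi' : i < m.length := List.mem_range.mp hi
  simp only [Function.comp_apply]
  rw [hR i]
  rcases i with _ | j
  · have e := hL (k + 0 - 1) (by omega)
    rw [h0, e]
    simp
  · have h1 : k + (j + 1) - 1 = k + j := by omega
    rw [h1, hR j]
    have d1 : decide (k + (j + 1) = 0) = false := by simp
    have d2 : decide (j + 1 = 0) = false := by simp
    rw [d1, d2]
    simp only [Nat.add_sub_cancel]

theorem ends_run (k : Nat) (hk : 0 < k) (m : List Bool) (h0 : m.getD 0 false = false) :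
    pvEnds (List.replicate k true ++ m) = (k - 1) :: (pvEnds m).map (fun i => k + i) := by
  unfold pvEnds
  have hlen : (List.replicate k true ++ m).length = k + m.length := by simp
  rw [hlen, List.range_add, List.filter_append, List.filter_map]
  have hL : ∀ i, i < k → (List.replicate k true ++ m).getD i false = true := by
    intro i hik
    rw [List.getD_append _ _ _ _ (by simpa using hik)]
    exact List.getD_replicate _ hik
  have hR : ∀ i, (List.replicate k true ++ m).getD (k + i) false = m.getD i false := by
    intro i
    rw [List.getD_append_right _ _ _ _ (by simp)]
    have h4 : k + i - (List.replicate k true).length = i := by simp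
    rw [h4]
  have hpart1 : List.filter
      (fun i => (List.replicate k true ++ m).getD i false &&
        (decide (i = k + m.length - 1) || !(List.replicate k true ++ m).getD (i + 1) false))
      (List.range k) = [k - 1] := by
    obtain ⟨k', rfl⟩ : ∃ k', k = k' + 1 := ⟨k - 1, by omega⟩
    rw [List.range_succ, List.filter_append]
    have h1 : List.filter
        (fun i => (List.replicate (k' + 1) true ++ m).getD i false &&
          (decide (i = k' + 1 + m.length - 1) ||
            !(List.replicate (k' + 1) true ++ m).getD (i + 1) false))
        (List.range k') = [] := by
      rw [List.filter_eq_nil_iff]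
      intro j hj
      have hj' : j < k' := List.mem_range.mp hj
      have e1 := hL j (by omega)
      have e2 := hL (j + 1) (by omega)
      have d : decide (j = k' + 1 + m.length - 1) = false := decide_eq_false (by omega)
      simp only [e1, e2, d]
      simp
    have h2 : ((List.replicate (k' + 1) true ++ m).getD k' false &&
        (decide (k' = k' + 1 + m.length - 1) ||
          !(List.replicate (k' + 1) true ++ m).getD (k' + 1) false)) = true := by
      have ek := hL k' (by omega)
      rcases Nat.eq_zero_or_pos m.length with hm | hm
      · have d : decide (k' = k' + 1 + m.length - 1) = true := decide_eq_true (by omega)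
        simp only [ek, d]
        simp
      · have h3 : (List.replicate (k' + 1) true ++ m).getD (k' + 1) false = m.getD 0 false := by
          have := hR 0
          simpa using this
        simp only [ek, h3, h0]
        simp
    rw [h1, List.nil_append, List.filter_cons, if_pos h2, List.filter_nil]
    simp
  rw [hpart1, List.singleton_append]
  congr 1
  congr 1
  apply List.filter_congr
  intro i hi
  have hi' : i < m.length := List.mem_range.mp hi
  simp only [Function.comp_apply]
  have hdec : decide (k + i = k + m.length - 1) = decide (i = m.length - 1) := by
    apply decide_eq_decide.mpr; omega
  have hnext : (List.replicate k true ++ m).getD (k + i + 1) false = m.getD (i + 1) false := by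
    have h3 : k + i + 1 = k + (i + 1) := by omega
    rw [h3, hR (i + 1)]
  rw [hR i, hdec, hnext]

theorem slice_shift (x : Int × String) (tp : List (Int × String)) (s e : Nat) :
    pvSlice (x :: tp) (s + 1, e + 1) = pvSlice tp (s, e) := by
  unfold pvSlice
  simp only [List.range'_eq_map_range, List.map_map]
  have harith : e + 1 + 1 - (s + 1) = e + 1 - s := by omega
  rw [harith]
  apply List.map_congr_left
  intro j _
  show ((x :: tp).getD (s + 1 + j) _).1 = (tp.getD (s + j) _).1
  have : s + 1 + j = (s + j) + 1 := by omega
  rw [this, List.getD_cons_succ]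

theorem slice_shift_k (u v : List (Int × String)) (s e : Nat) :
    pvSlice (u ++ v) (u.length + s, u.length + e) = pvSlice v (s, e) := by
  unfold pvSlice
  simp only [List.range'_eq_map_range, List.map_map]
  have harith : u.length + e + 1 - (u.length + s) = e + 1 - s := by omega
  rw [harith]
  apply List.map_congr_left
  intro j _
  show (((u ++ v).getD (u.length + s + j) _)).1 = ((v.getD (s + j) _)).1
  rw [List.getD_append_right _ _ _ _ (by omega)]
  congr 2; omega

theorem slice_head (u v : List (Int × String)) (hu : u ≠ []) :
    pvSlice (u ++ v) (0, u.length - 1) = u.map Prod.fst := by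
  unfold pvSlice
  have hlen : u.length - 1 + 1 - 0 = u.length := by
    have : 0 < u.length := List.length_pos_iff.mpr hu
    omega
  rw [hlen]
  apply List.ext_getElem (by simp)
  intro i h1 h2
  simp only [List.getElem_map, List.getElem_range']
  have hi : i < u.length := by simpa using h2
  rw [List.getD_append _ _ _ _ (by simpa using hi)]
  simp [List.getElem?_eq_getElem hi]

theorem alt_cons_false (p : Int) (l : String) (xs : List (Int × String)) (t : String)
    (hl : ¬ l = t) : group_segments_alt ((p, l) :: xs) t = group_segments_alt xs t := by
  have hb : (l == t) = false := by simpa using hl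
  show (((pvStarts (pvMask ((p, l) :: xs) t)).zip (pvEnds (pvMask ((p, l) :: xs) t))).map
      (pvSlice ((p, l) :: xs))) = _
  rw [mask_cons, hb, starts_cons_false, ends_cons_false, List.zip_map, List.map_map]
  apply List.map_congr_left
  rintro ⟨a, b⟩ _
  exact slice_shift (p, l) xs a b

theorem mask_run (u : List (Int × String)) (t : String) (hall : ∀ pl ∈ u, pl.2 = t) :
    pvMask u t = List.replicate u.length true := by
  apply List.eq_replicate_iff.mpr
  constructor
  · simp [pvMask]
  · intro b hb
    obtain ⟨pl, hpl, rfl⟩ := List.mem_map.mp hb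
    simpa using hall pl hpl

theorem alt_run (t : String) (u v : List (Int × String)) (hu : u ≠ [])
    (hall : ∀ pl ∈ u, pl.2 = t)
    (hv : (pvMask v t).getD 0 false = false) :
    group_segments_alt (u ++ v) t = (u.map Prod.fst) :: group_segments_alt v t := by
  have hk : 0 < u.length := List.length_pos_iff.mpr hu
  have hmask : pvMask (u ++ v) t = List.replicate u.length true ++ pvMask v t := by
    have h5 : List.map (fun pl => pl.2 == t) u = List.replicate u.length true :=
      mask_run u t hall
    simp [pvMask, h5]
  show (((pvStarts (pvMask (u ++ v) t)).zip (pvEnds (pvMask (u ++ v) t))).map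
      (pvSlice (u ++ v))) = _
  rw [hmask, starts_run u.length hk _ hv, ends_run u.length hk _ hv]
  rw [List.zip_cons_cons, List.zip_map, List.map_cons, List.map_map]
  congr 1
  · exact slice_head u v hu
  · apply List.map_congr_left
    rintro ⟨a, b⟩ _
    exact slice_shift_k u v a b

theorem mask_dropWhile (t : String) (l : List (Int × String)) :
    (pvMask (l.dropWhile (fun pl => pl.2 == t)) t).getD 0 false = false := by
  induction l with
  | nil => rfl
  | cons a l ih =>
      by_cases ha : (a.2 == t) = true
      · rw [List.dropWhile_cons, if_pos ha]; exact ih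
      · rw [List.dropWhile_cons, if_neg ha]
        have ha' : (a.2 == t) = false := by simpa using ha
        simp [pvMask, ha']

theorem main_eq (t : String) : ∀ (n : Nat) (tp : List (Int × String)), tp.length ≤ n →
    pvFA t [] tp = group_segments_alt tp t := by
  intro n
  induction n with
  | zero =>
      intro tp h
      have : tp = [] := List.length_eq_zero_iff.mp (by omega)
      subst this
      rfl
  | succ n ih =>
      intro tp h
      match tp with
      | [] => rfl
      | (p, l) :: xs =>
          by_cases hl : l = t
          · -- head matches: split off the maximal matching run
            set u := ((p, l) :: xs).takeWhile (fun pl => pl.2 == t) with hu_def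
            set v := ((p, l) :: xs).dropWhile (fun pl => pl.2 == t) with hv_def
            have huv : u ++ v = (p, l) :: xs := List.takeWhile_append_dropWhile
            have hu : u ≠ [] := by
              rw [hu_def, List.takeWhile_cons_of_pos (by simpa using hl)]
              simp
            have hall : ∀ pl ∈ u, pl.2 = t := by
              intro pl hpl
              have := List.mem_takeWhile_imp (hu_def ▸ hpl)
              simpa using this
            have hv : (pvMask v t).getD 0 false = false := mask_dropWhile t _
            have hlen : v.length < ((p, l) :: xs).length := by
              have h1 : u.length + v.length = ((p, l) :: xs).length := by
                rw [← List.length_append, huv]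
              have h2 : 0 < u.length := List.length_pos_iff.mpr hu
              omega
            have hvle : v.length ≤ n := by
              have : ((p, l) :: xs).length ≤ n + 1 := h
              omega
            have step1 : pvFA t [] (u ++ v) = pvFA t (u.map Prod.fst) v := by
              simpa using fA_run t u [] v hall
            have hcnil : u.map Prod.fst ≠ [] := by simpa using hu
            have step2 : pvFA t (u.map Prod.fst) v = (u.map Prod.fst) :: pvFA t [] v := by
              match v, hv with
              | [], _ => simp [pvFA, pvFlush, hcnil]
              | (q, l') :: v', hv =>
                  have hl' : ¬ l' = t := by
                    simp [pvMask] at hv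
                    exact hv
                  simp [pvFA, pvFlush, hl', hcnil]
            rw [← huv, alt_run t u v hu hall hv, step1, step2]
            congr 1
            exact ih v hvle
          · have step : pvFA t [] ((p, l) :: xs) = pvFA t [] xs := by
              simp [pvFA, pvFlush, hl]
            rw [step, alt_cons_false p l xs t hl]
            exact ih xs (by simpa using Nat.lt_succ_iff.mp (by simpa using h))

-- ===== VERDICT (by name: the statement is the Claim_ definition above) =====
theorem group_segments_spec : Claim_equal_group_segments := by
  intro tp t _
  show _ = _
  rw [A_eq_fA]
  exact main_eq t tp.length tp le_rfl
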